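-- pv_equiv track=rewrite | github.com/arjunyashu/Assignment | Assignment.py | get_weights_of_pages
-- ===== SOURCE A (Python) =====
-- def get_weights_of_pages(dict_of_pages, query, weights):
--     weight_of_pages = {}
--     weights = list(reversed(range(1,9)))
--     for page_name in dict_of_pages:
--         calculated_weight = 0
--         for element in dict_of_pages[page_name]:
--             if(element in query):
--                 calculated_weight+=(weights[query.index(element)]* weights[dict_of_pages[page_name].index(element)])
--         weight_of_pages[page_name] = calculated_weight
--     return weight_of_pages
-- ===== SOURCE B (Python) =====
-- def get_weights_of_pages(dict_of_pages, query, weights):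
--     # Query-driven: the weight table the original overwrites `weights` with is the
--     # fixed 8-entry list [8,7,...,1], so only the first eight query positions carry a
--     # weight (8 - position).  For each first occurrence of a query term among those,
--     # scan the page once for its multiplicity and first position.
--     result = {}
--     for page_name, elems in dict_of_pages.items():
--         total = 0
--         for qi, e in enumerate(query[:8]):
--             if e in query[:qi]:
--                 continue  # only the first occurrence of a query term counts
--             cnt = 0
--             first = None
--             for pi, x in enumerate(elems):
--                 if x == e:
--                     cnt += 1
--                     if first is None:
--                         first = pi
--             if cnt:
--                 total += cnt * (8 - qi) * (8 - first)
--         result[page_name] = total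
--     return result
-- ===== Notes on version B (the rewrite author's own statement) =====
-- stated objective: alternative
-- what changed: A is page-driven, summing per occurrence of each page element with repeated `in query`/query.index/list.index scans into the rebuilt weights table; B inverts the loop to be query-driven over the first eight query positions (the only ones the 8-entry table [8,7,...,1] gives a weight, 8-i, used in closed form), skips repeated query terms, and scans each page once per term for multiplicity and first position together.
import Mathlib
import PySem

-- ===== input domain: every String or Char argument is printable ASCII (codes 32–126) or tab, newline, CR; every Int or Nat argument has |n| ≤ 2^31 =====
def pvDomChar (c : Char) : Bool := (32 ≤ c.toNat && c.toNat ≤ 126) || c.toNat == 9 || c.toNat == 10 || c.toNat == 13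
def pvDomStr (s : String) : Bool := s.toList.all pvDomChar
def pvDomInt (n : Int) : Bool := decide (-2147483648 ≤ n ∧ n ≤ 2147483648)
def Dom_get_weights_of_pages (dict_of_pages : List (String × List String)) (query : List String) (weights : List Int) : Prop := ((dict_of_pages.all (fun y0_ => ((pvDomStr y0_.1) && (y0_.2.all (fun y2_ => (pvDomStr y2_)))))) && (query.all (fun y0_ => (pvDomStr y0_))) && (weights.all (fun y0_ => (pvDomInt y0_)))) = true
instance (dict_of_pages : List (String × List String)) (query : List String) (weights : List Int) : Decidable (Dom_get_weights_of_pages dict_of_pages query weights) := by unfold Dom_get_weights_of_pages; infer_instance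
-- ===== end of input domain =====

-- B inverts the loop: it is query-driven over the first eight query positions (the only
-- ones A's rebuilt 8-entry table [8,7,...,1] weights, with 8-i used in closed form), skips
-- repeated query terms, and scans each page once per term for multiplicity and first position.
-- The equivalence is about the RETURN value; neither program observably mutates its
-- arguments (A only rebinds its local `weights`, which both ports reproduce).

-- ===== PORT A =====
def get_weights_of_pages (dict_of_pages : List (String × List String)) (query : List String) (weights : List Int) : List (String × Int) :=
  -- weight_of_pages = {}; weights = list(reversed(range(1,9)))
  let weights := (PySem.List.pyRange 1 9 1).reverse
  let d := PySem.Dict.ofList dict_of_pages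
  ((PySem.Dict.keys d).foldl (fun weight_of_pages page_name =>
      -- calculated_weight = 0; for element in dict_of_pages[page_name]: ...
      -- (the weights[...] lookups are pyGetD: in range under Pre_, where Python does not raise)
      let calculated_weight := (PySem.Dict.getD d page_name []).foldl (fun cw element =>
        if element ∈ query then
          cw + PySem.List.pyGetD weights (((PySem.List.index? query element).getD 0 : Nat) : Int) 0 *
               PySem.List.pyGetD weights (((PySem.List.index? (PySem.Dict.getD d page_name []) element).getD 0 : Nat) : Int) 0
        else cw) 0
      PySem.Dict.insert weight_of_pages page_name calculated_weight)
    PySem.Dict.empty).items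

-- ===== PORT B =====
def get_weights_of_pages_alt (dict_of_pages : List (String × List String)) (query : List String) (weights : List Int) : List (String × Int) :=
  ((PySem.Dict.ofList dict_of_pages).items.foldl (fun result pg =>
      -- for qi, e in enumerate(query[:8]): if e in query[:qi]: continue; ...
      -- (only the first eight query positions carry a weight 8 - qi)
      let total := (PySem.List.enumerate (PySem.List.slice query none (some 8)) 0).foldl (fun total qe =>
          if qe.2 ∈ PySem.List.slice query none (some qe.1) then total
          else
            -- cnt, first = 0, None; single scan of the page for count and first position
            let cf := (PySem.List.enumerate pg.2 0).foldl (fun cf pe =>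
                if pe.2 = qe.2 then
                  (cf.1 + 1, if cf.2 = none then some pe.1 else cf.2)
                else cf) ((0 : Int), (none : Option Int))
            -- if cnt: total += cnt * (8 - qi) * (8 - first)   (cnt ≠ 0 guarantees first is set)
            if cf.1 ≠ 0 then total + cf.1 * (8 - qe.1) * (8 - cf.2.getD 0) else total)
        0
      PySem.Dict.insert result pg.1 total)
    PySem.Dict.empty).items

-- ===== PRECONDITION & SPEC =====
-- Pre_ excludes exactly the inputs on which Python A raises IndexError: a page element that
-- occurs in the query but whose first index in the query or in its page's element list is ≥ 8
-- (A indexes the 8-element list [8,7,6,5,4,3,2,1] with those first indices).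
def Pre_get_weights_of_pages (dict_of_pages : List (String × List String)) (query : List String) (weights : List Int) : Prop :=
  ∀ p ∈ (PySem.Dict.ofList dict_of_pages).items, ∀ e ∈ p.2, e ∈ query →
    (PySem.List.index? query e).getD 0 < 8 ∧ (PySem.List.index? p.2 e).getD 0 < 8
instance (dict_of_pages : List (String × List String)) (query : List String) (weights : List Int) : Decidable (Pre_get_weights_of_pages dict_of_pages query weights) := by unfold Pre_get_weights_of_pages; infer_instance

def pvWitness_get_weights_of_pages : (List (String × List String)) × List String × List Int :=
  ([("p", ["a", "b", "a"]), ("q", ["c"])], ["b", "a"], [])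

def Spec_get_weights_of_pages (dict_of_pages : List (String × List String)) (query : List String) (weights : List Int) (out : List (String × Int)) : Prop := out = get_weights_of_pages_alt dict_of_pages query weights
instance (dict_of_pages : List (String × List String)) (query : List String) (weights : List Int) (out : List (String × Int)) : Decidable (Spec_get_weights_of_pages dict_of_pages query weights out) := by unfold Spec_get_weights_of_pages; infer_instance

-- ===== CLAIM (what is proved, stated in full; the proofs are below) =====
def Claim_equal_get_weights_of_pages : Prop := ∀ (dict_of_pages : List (String × List String)) (query : List String) (weights : List Int), Dom_get_weights_of_pages dict_of_pages query weights → Pre_get_weights_of_pages dict_of_pages query weights → Spec_get_weights_of_pages dict_of_pages query weights (get_weights_of_pages dict_of_pages query weights)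

-- ===== LEMMAS AND PROOFS =====

-- the fixed weights table both programs conceptually use
def pvW : List Int := (PySem.List.pyRange 1 9 1).reverse

-- table lookup = closed form 8 - k for k < 8
theorem pvW_lookup (k : Nat) (hk : k < 8) :
    PySem.List.pyGetD pvW ((k : Nat) : Int) 0 = 8 - (k : Int) := by
  interval_cases k <;> decide

-- B's inner scan over one page returns (multiplicity, first position)
theorem pv_inner_scan (elems : List String) (e : String) :
    (PySem.List.enumerate elems 0).foldl (fun cf pe =>
        if pe.2 = e then (cf.1 + 1, if cf.2 = none then some pe.1 else cf.2) else cf)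
      ((0 : Int), (none : Option Int)) =
    (((elems.count e : Nat) : Int), (PySem.List.index? elems e).map (fun n => (n : Int))) := by
  induction elems using List.reverseRecOn with
  | nil => simp [PySem.List.enumerate]
  | append_singleton xs x ih =>
    rw [PySem.List.enumerate_append, List.foldl_append, ih]
    simp only [PySem.List.enumerate, List.foldl]
    by_cases hx : x = e
    · subst hx
      simp only [if_pos rfl]
      by_cases hm : x ∈ xs
      · have hs := (PySem.List.index?_isSome_iff xs x).mpr hm
        rcases Option.isSome_iff_exists.mp hs with ⟨k, hk⟩
        rw [PySem.List.index?_append_of_mem _ hm]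
        rw [PySem.List.index?_eq_idxOf?] at hk ⊢
        simp [hk, List.count_append, hm]
      · have h1 : PySem.List.index? xs x = none := (PySem.List.index?_eq_none_iff _ _).mpr hm
        have h2 := PySem.List.index?_append_singleton_self xs x hm
        rw [PySem.List.index?_eq_idxOf?] at h1 h2
        simp [h1, h2, List.count_eq_zero_of_not_mem hm]
    · simp only [if_neg hx]
      by_cases hm : e ∈ xs
      · rw [PySem.List.index?_append_of_mem _ hm]
        simp [List.count_singleton, hx]
      · have h1 : PySem.List.index? xs e = none := (PySem.List.index?_eq_none_iff _ _).mpr hm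
        have h2 : PySem.List.index? (xs ++ [x]) e = none := by
          refine (PySem.List.index?_eq_none_iff _ _).mpr ?_
          simp only [List.mem_append, List.mem_singleton]
          exact fun h => h.elim hm (fun h' => hx h'.symm)
        rw [h1, h2]
        simp [List.count_singleton, hx]


-- B's per-page total as a sum over the deduplicated query (first occurrences, first indices)
theorem pv_bsum (qs : List String) (G : Int → String → Int) :
    ((PySem.List.enumerate qs 0).map (fun p =>
        if p.2 ∈ PySem.List.slice qs none (some p.1) then 0 else G p.1 p.2)).sum =
    ((PySem.List.dedup qs).map (fun e => G (((PySem.List.index? qs e).getD 0 : Nat) : Int) e)).sum := by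
  induction qs using List.reverseRecOn with
  | nil => simp [PySem.List.enumerate, PySem.List.dedup]
  | append_singleton xs x ih =>
    rw [PySem.List.enumerate_append, List.map_append, List.sum_append]
    -- prefix part: the slice bound stays below xs.length, so take over xs++[x] = take over xs
    have hpref : ((PySem.List.enumerate xs 0).map (fun p =>
        if p.2 ∈ PySem.List.slice (xs ++ [x]) none (some p.1) then 0 else G p.1 p.2)).sum
        = ((PySem.List.enumerate xs 0).map (fun p =>
        if p.2 ∈ PySem.List.slice xs none (some p.1) then 0 else G p.1 p.2)).sum := by
      congr 1
      refine List.map_congr_left ?_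
      intro p hp
      rcases (PySem.List.mem_enumerate_iff _ _ _).mp hp with ⟨k, hk, rfl⟩
      simp only [zero_add]
      rw [PySem.List.slice_to_natCast, PySem.List.slice_to_natCast,
          List.take_append_of_le_length (le_of_lt hk)]
    rw [hpref, ih]
    -- last element
    simp only [PySem.List.enumerate, List.map, List.sum_cons, List.sum_nil, zero_add, add_zero]
    rw [PySem.List.slice_to_natCast, List.take_append_of_le_length (le_refl _), List.take_length]
    -- dedup of xs ++ [x]
    by_cases hm : x ∈ xs
    · have hd : PySem.List.dedup (xs ++ [x]) = PySem.List.dedup xs := by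
        rw [show PySem.List.dedup (xs ++ [x]) = PySem.Set.add (PySem.List.dedup xs) x from by
          simp only [PySem.List.dedup_eq_ofList, PySem.Set.ofList_eq_foldl, List.foldl_append,
            List.foldl]]
        simp [PySem.Set.add, PySem.Set.contains, hm]
      rw [hd, if_pos hm, add_zero]
      congr 1
      refine List.map_congr_left ?_
      intro e he
      have : e ∈ xs := (PySem.List.mem_dedup _ _).mp he
      rw [PySem.List.index?_append_of_mem _ this]
    · have hd : PySem.List.dedup (xs ++ [x]) = PySem.List.dedup xs ++ [x] := by
        rw [show PySem.List.dedup (xs ++ [x]) = PySem.Set.add (PySem.List.dedup xs) x from by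
          simp only [PySem.List.dedup_eq_ofList, PySem.Set.ofList_eq_foldl, List.foldl_append,
            List.foldl]]
        simp [PySem.Set.add, PySem.Set.contains, hm]
      rw [hd, if_neg hm, List.map_append, List.sum_append]
      congr 1
      · refine congrArg List.sum (List.map_congr_left ?_)
        intro e he
        have : e ∈ xs := (PySem.List.mem_dedup _ _).mp he
        rw [PySem.List.index?_append_of_mem _ this]
      · simp only [List.map, List.sum_cons, List.sum_nil, add_zero]
        rw [PySem.List.index?_append_singleton_self xs x hm]
        simp


-- an element found before index 8 is found at the same place in query[:8]
theorem pv_take8 (qs : List String) (e : String) (he : e ∈ qs)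
    (h8 : (PySem.List.index? qs e).getD 0 < 8) :
    e ∈ qs.take 8 ∧ PySem.List.index? (qs.take 8) e = PySem.List.index? qs e := by
  rcases Option.isSome_iff_exists.mp ((PySem.List.index?_isSome_iff qs e).mpr he) with ⟨k, hk⟩
  have hk8 : k < 8 := by rw [hk] at h8; simpa using h8
  rcases (PySem.List.index?_eq_some_iff qs e k).mp hk with ⟨pre, suf, rfl, hlen, hnp⟩
  have htake : (pre ++ e :: suf).take 8 = pre ++ e :: suf.take (8 - k - 1) := by
    rw [List.take_append, List.take_of_length_le (by omega),
        show 8 - pre.length = (8 - k - 1) + 1 by omega, List.take_succ_cons]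
  rw [htake]
  constructor
  · simp
  · rw [hk, (PySem.List.index?_eq_some_iff _ e k).mpr ⟨pre, suf.take (8 - k - 1), rfl, hlen, hnp⟩]

-- A's per-occurrence page total equals B's query-driven page total
theorem pv_page_total (query elems : List String)
    (hpre : ∀ e ∈ elems, e ∈ query →
      (PySem.List.index? query e).getD 0 < 8 ∧ (PySem.List.index? elems e).getD 0 < 8) :
    elems.foldl (fun cw element =>
        if element ∈ query then
          cw + PySem.List.pyGetD pvW (((PySem.List.index? query element).getD 0 : Nat) : Int) 0 *
               PySem.List.pyGetD pvW (((PySem.List.index? elems element).getD 0 : Nat) : Int) 0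
        else cw) 0 =
    (PySem.List.enumerate (PySem.List.slice query none (some 8)) 0).foldl (fun total qe =>
        if qe.2 ∈ PySem.List.slice query none (some qe.1) then total
        else
          let cf := (PySem.List.enumerate elems 0).foldl (fun cf pe =>
              if pe.2 = qe.2 then (cf.1 + 1, if cf.2 = none then some pe.1 else cf.2) else cf)
            ((0 : Int), (none : Option Int))
          if cf.1 ≠ 0 then total + cf.1 * (8 - qe.1) * (8 - cf.2.getD 0) else total) 0 := by
  have hq8 : PySem.List.slice query none (some 8) = query.take 8 :=
    PySem.List.slice_to query (by norm_num)
  rw [hq8]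
  -- names for the per-element quantities
  set g : String → Int := fun e =>
    PySem.List.pyGetD pvW (((PySem.List.index? query e).getD 0 : Nat) : Int) 0 *
    PySem.List.pyGetD pvW (((PySem.List.index? elems e).getD 0 : Nat) : Int) 0 with hg
  set G : Int → String → Int := fun qi e =>
    if ((elems.count e : Nat) : Int) ≠ 0 then
      ((elems.count e : Nat) : Int) * (8 - qi) *
        (8 - ((PySem.List.index? elems e).map (fun n => (n : Int))).getD 0)
    else 0 with hG
  -- B side: rewrite the loop body into accumulator + summand, then sum over enumerate, then pv_bsum
  have hB : (PySem.List.enumerate (query.take 8) 0).foldl (fun total qe =>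
        if qe.2 ∈ PySem.List.slice query none (some qe.1) then total
        else
          let cf := (PySem.List.enumerate elems 0).foldl (fun cf pe =>
              if pe.2 = qe.2 then (cf.1 + 1, if cf.2 = none then some pe.1 else cf.2) else cf)
            ((0 : Int), (none : Option Int))
          if cf.1 ≠ 0 then total + cf.1 * (8 - qe.1) * (8 - cf.2.getD 0) else total) 0
      = ((PySem.List.dedup (query.take 8)).map (fun e =>
          G (((PySem.List.index? (query.take 8) e).getD 0 : Nat) : Int) e)).sum := by
    rw [PySem.List.foldl_congr_mem (l := PySem.List.enumerate (query.take 8) 0)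
      (g := fun total qe => total +
        (if qe.2 ∈ PySem.List.slice (query.take 8) none (some qe.1) then 0 else G qe.1 qe.2)) _ _
      (by
        intro total qe hqe
        rcases (PySem.List.mem_enumerate_iff _ _ _).mp hqe with ⟨k, hk, rfl⟩
        have hk8 : k ≤ 8 := by
          have := hk; rw [List.length_take] at this; omega
        simp only [zero_add, PySem.List.slice_to_natCast, List.take_take, Nat.min_eq_left hk8]
        rw [pv_inner_scan elems]
        by_cases hmem : (List.take 8 query)[k] ∈ List.take k query
        · rw [if_pos hmem, if_pos hmem, add_zero]
        · rw [if_neg hmem, if_neg hmem]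
          simp only [hG]
          split_ifs <;> simp)]
    rw [PySem.List.foldl_add, pv_bsum (query.take 8), zero_add]
  rw [hB]
  -- A side: accumulator + summand, then list sum, then multiset count sum
  rw [PySem.List.foldl_congr_mem (l := elems)
    (g := fun cw e => cw + (if e ∈ query then g e else 0)) _ _
    (by intro cw e _; by_cases hq : e ∈ query <;> simp [hq, hg])]
  rw [PySem.List.foldl_add, zero_add]
  -- both sides as Finset sums over the elements common to elems and query
  have hA : ((elems.map (fun e => if e ∈ query then g e else 0)).sum)
      = ∑ a ∈ elems.toFinset.filter (· ∈ query), ((elems.count a : Nat) : Int) * g a := by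
    have h := Finset.sum_multiset_map_count (elems : Multiset String)
      (fun e => if e ∈ query then g e else 0)
    simp only [List.toFinset_coe, Multiset.coe_count, Multiset.map_coe, Multiset.sum_coe] at h
    rw [h]
    simp only [nsmul_eq_mul, mul_ite, mul_zero]
    rw [Finset.sum_filter]
  rw [hA]
  -- B's dedup-query sum as a Finset sum over the common elements
  have hdn : (PySem.List.dedup (query.take 8)).Nodup := PySem.List.nodup_dedup (query.take 8)
  have htf : (PySem.List.dedup (query.take 8)).toFinset = (query.take 8).toFinset := by
    ext a; simp [List.mem_toFinset]
  have hBsum : ((PySem.List.dedup (query.take 8)).map (fun e =>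
        G (((PySem.List.index? (query.take 8) e).getD 0 : Nat) : Int) e)).sum
      = ∑ a ∈ (query.take 8).toFinset.filter (· ∈ elems),
          ((elems.count a : Nat) : Int) *
            (8 - (((PySem.List.index? (query.take 8) a).getD 0 : Nat) : Int)) *
            (8 - (((PySem.List.index? elems a).getD 0 : Nat) : Int)) := by
    rw [← List.sum_toFinset _ hdn, htf, Finset.sum_filter]
    refine Finset.sum_congr rfl ?_
    intro a _
    simp only [hG]
    by_cases hm : a ∈ elems
    · have hc : elems.count a ≠ 0 := by
        have := List.count_pos_iff.mpr hm
        omega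
      have hs := (PySem.List.index?_isSome_iff elems a).mpr hm
      rcases Option.isSome_iff_exists.mp hs with ⟨k, hk⟩
      rw [PySem.List.index?_eq_idxOf?] at hk
      simp [hm, hc, hk]
    · have hc : elems.count a = 0 := List.count_eq_zero_of_not_mem hm
      simp [hm, hc]
  rw [hBsum]
  -- the two filtered index sets coincide (by Pre_, matches sit in the first 8 query slots),
  -- and the summands agree there by pvW_lookup
  have hset : elems.toFinset.filter (· ∈ query) = (query.take 8).toFinset.filter (· ∈ elems) := by
    ext a
    simp only [Finset.mem_filter, List.mem_toFinset]
    constructor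
    · rintro ⟨hae, haq⟩
      exact ⟨(pv_take8 query a haq (hpre a hae haq).1).1, hae⟩
    · rintro ⟨hq8, hae⟩
      exact ⟨hae, List.mem_of_mem_take hq8⟩
  rw [hset]
  refine Finset.sum_congr rfl ?_
  intro a ha
  rcases Finset.mem_filter.mp ha with ⟨haq8, hae⟩
  rw [List.mem_toFinset] at haq8
  have haq : a ∈ query := List.mem_of_mem_take haq8
  rcases hpre a hae haq with ⟨h1, h2⟩
  rw [hg]
  simp only
  rw [(pv_take8 query a haq h1).2, pvW_lookup _ h1, pvW_lookup _ h2]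
  ring


-- ===== VERDICT (by name: the statement is the Claim_ definition above) =====
theorem get_weights_of_pages_spec : Claim_equal_get_weights_of_pages := by
  intro dict_of_pages query weights _ hpre
  unfold Spec_get_weights_of_pages get_weights_of_pages get_weights_of_pages_alt
  simp only [PySem.Dict.keys, List.foldl_map]
  congr 1
  refine PySem.List.foldl_congr_mem _ _ _ _ ?_
  intro acc p hp
  have hget : PySem.Dict.getD (PySem.Dict.ofList dict_of_pages) p.1 [] = p.2 := by
    rw [PySem.Dict.getD_eq_get?_getD,
        PySem.Dict.get?_of_mem_items _ (by rw [Prod.mk.eta]; exact hp) (PySem.Dict.nodup_keys_ofList dict_of_pages)]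
    rfl
  rw [hget]
  have h := pv_page_total query p.2 (fun e he hq => hpre p hp e he hq)
  simp only [pvW] at h
  rw [h]
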